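-- pv_equiv track=rewrite | github.com/vaccineontology/VO-SemRep | Installation/vo_extract.py | gen_strdict_histogram
-- ===== SOURCE A (Python) =====
-- def gen_strdict_histogram(strdict):
--     """ Generate histrogram of lengths of string dictionary values. """
--     histogram = {}
--     for v in strdict.values():
--         key = '%d' % len(v)
--         if key in histogram:
--             histogram[key] += 1
--         else:
--             histogram[key] = 1
--     return histogram
-- ===== SOURCE B (Python) =====
-- def _runs(s):
--     """Run-length encode an already-sorted list: [(value, run length), ...]."""
--     runs = []
--     while s:
--         head = s[0]
--         n = 1
--         while n < len(s) and s[n] == head: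
--             n += 1
--         runs.append((head, n))
--         s = s[n:]
--     return runs
--
--
-- def gen_strdict_histogram(strdict):
--     """Histogram of lengths of string dictionary values, with no running
--     counter: sort the formatted length keys, run-length encode the sorted
--     list to obtain each key's count, then emit the counts keyed in
--     first-occurrence order of the original keys."""
--     keys = ['%d' % len(v) for v in strdict.values()]
--     counts = dict(_runs(sorted(keys)))
--     return {k: counts[k] for k in dict.fromkeys(keys)}
-- ===== Notes on version B (the rewrite author's own statement) =====
-- stated objective: alternative
-- what changed: Replaces the single-pass running dict counter with a staged sort-and-group algorithm: sort the formatted length keys, run-length encode the sorted list to get each key's count, then emit the counts in first-occurrence key order.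
import Mathlib
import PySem

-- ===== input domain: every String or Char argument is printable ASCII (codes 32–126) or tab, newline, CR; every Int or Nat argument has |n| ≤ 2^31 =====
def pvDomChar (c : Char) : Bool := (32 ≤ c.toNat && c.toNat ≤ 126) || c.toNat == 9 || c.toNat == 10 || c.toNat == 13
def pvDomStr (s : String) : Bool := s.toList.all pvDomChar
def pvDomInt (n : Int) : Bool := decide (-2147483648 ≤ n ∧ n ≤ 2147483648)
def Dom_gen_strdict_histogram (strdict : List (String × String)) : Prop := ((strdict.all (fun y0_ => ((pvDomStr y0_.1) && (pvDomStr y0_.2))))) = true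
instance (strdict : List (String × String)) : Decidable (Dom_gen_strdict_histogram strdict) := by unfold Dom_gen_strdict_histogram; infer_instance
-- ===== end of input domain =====

-- B replaces A's running dict counter by a staged sort + run-length-encode pass; counts are then emitted in first-occurrence key order (alternative decomposition, same results).

-- ===== PORT A =====
-- for v in strdict.values(): key = '%d' % len(v); if key in histogram: histogram[key] += 1 else: histogram[key] = 1
def gen_strdict_histogram (strdict : List (String × String)) : List (String × Int) :=
  (strdict.foldl
    (fun (histogram : PySem.Dict String Int) p =>
      let key := PySem.Int.toStr (PySem.Str.len p.2)
      if histogram.contains key then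
        histogram.insert key (histogram.getD key 0 + 1)
      else
        histogram.insert key 1)
    PySem.Dict.empty).items

-- ===== PORT B =====
-- _runs(s): while s: head = s[0]; n counts the leading run of head (n-1 = takeWhile length over the tail);
--           append (head, n); s = s[n:] (= dropWhile over the tail) — the while loop is this tail recursion
def pvRuns (s : List String) : List (String × Int) :=
  match s with
  | [] => []
  | head :: xs =>
      (head, (1 + (xs.takeWhile (fun x => x == head)).length : Int))
        :: pvRuns (xs.dropWhile (fun x => x == head))
termination_by s.length
decreasing_by
  have := List.length_dropWhile_le (p := fun x => x == head) (l := xs)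
  simp only [List.length_cons]; omega

-- keys = ['%d' % len(v) for v in strdict.values()]
-- counts = dict(_runs(sorted(keys)))
-- {k: counts[k] for k in dict.fromkeys(keys)}  — every k here is a key of counts, so
-- counts[k] (which never raises) is ported as getD k 0
def gen_strdict_histogram_alt (strdict : List (String × String)) : List (String × Int) :=
  let keys := strdict.map (fun p => PySem.Int.toStr (PySem.Str.len p.2))
  let counts := PySem.Dict.ofList (pvRuns (PySem.List.sorted keys (fun x => x) false))
  (PySem.List.dedup keys).map (fun k => (k, counts.getD k 0))

-- ===== PRECONDITION & SPEC =====
def Spec_gen_strdict_histogram (strdict : List (String × String)) (out : List (String × Int)) : Prop := out = gen_strdict_histogram_alt strdict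
instance (strdict : List (String × String)) (out : List (String × Int)) : Decidable (Spec_gen_strdict_histogram strdict out) := by unfold Spec_gen_strdict_histogram; infer_instance

-- ===== CLAIM (what is proved, stated in full; the proofs are below) =====
def Claim_equal_gen_strdict_histogram : Prop := ∀ (strdict : List (String × String)), Dom_gen_strdict_histogram strdict → Spec_gen_strdict_histogram strdict (gen_strdict_histogram strdict)

-- ===== LEMMAS AND PROOFS =====

-- every key of the run-length encoding is an element of the encoded list
theorem pv_runs_key_mem (s : List String) : ∀ p ∈ pvRuns s, p.1 ∈ s := by
  induction s using pvRuns.induct with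
  | case1 => intro p hp; simp [pvRuns] at hp
  | case2 head xs ih =>
    intro p hp
    rw [pvRuns] at hp
    rcases List.mem_cons.mp hp with h | h
    · subst h; exact List.mem_cons_self
    · exact List.mem_cons_of_mem _ ((List.dropWhile_sublist _).subset (ih p h))

-- in a sorted list, the head does not reappear after its leading run
theorem pv_head_not_mem_drop (head : String) (xs : List String)
    (hs : (head :: xs).Pairwise (· ≤ ·)) :
    head ∉ xs.dropWhile (fun x => x == head) := by
  intro hmem
  rcases hd : xs.dropWhile (fun x => x == head) with _ | ⟨y, t⟩
  · simp [hd] at hmem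
  · have hy : ¬ (y == head) = true := by
      have := List.head?_dropWhile_not (p := fun x => x == head) (l := xs)
      rw [hd] at this; simpa using this
    have hyne : y ≠ head := by simpa using hy
    have hysub : List.Sublist (xs.dropWhile (fun x => x == head)) xs :=
      List.dropWhile_sublist _
    have hymem : y ∈ xs := hysub.subset (by simp [hd])
    have hhead_le : head ≤ y := (List.pairwise_cons.mp hs).1 y hymem
    have hdpw : (y :: t).Pairwise (· ≤ ·) := by
      have := ((List.pairwise_cons.mp hs).2).sublist hysub
      rwa [hd] at this
    rw [hd] at hmem
    rcases List.mem_cons.mp hmem with h | h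
    · exact hyne h.symm
    · have : y ≤ head := (List.pairwise_cons.mp hdpw).1 head h
      exact hyne (le_antisymm this hhead_le)

-- the run-length encoding of a sorted list carries each member's total count
theorem pv_runs_count_mem (s : List String) (hs : s.Pairwise (· ≤ ·)) :
    ∀ k ∈ s, (k, (s.count k : Int)) ∈ pvRuns s := by
  induction s using pvRuns.induct with
  | case1 => intro k hk; simp at hk
  | case2 head xs ih =>
    intro k hk
    have hsplit : xs.takeWhile (fun x => x == head) ++ xs.dropWhile (fun x => x == head) = xs :=
      List.takeWhile_append_dropWhile
    have htake : ∀ x ∈ xs.takeWhile (fun x => x == head), x = head := by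
      intro x hx
      have := List.mem_takeWhile_imp hx
      simpa using this
    have hdrop_pw : (xs.dropWhile (fun x => x == head)).Pairwise (· ≤ ·) :=
      ((List.pairwise_cons.mp hs).2).sublist (List.dropWhile_sublist _)
    by_cases hkh : k = head
    · subst hkh
      have hxs : xs.count k = (xs.takeWhile (fun x => x == k)).count k +
          (xs.dropWhile (fun x => x == k)).count k := by
        conv_lhs => rw [← hsplit]
        rw [List.count_append]
      have hc : (k :: xs).count k =
          1 + (xs.takeWhile (fun x => x == k)).length := by
        rw [List.count_cons_self]
        have h1 : (xs.takeWhile (fun x => x == k)).count k =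
            (xs.takeWhile (fun x => x == k)).length :=
          List.count_eq_length.mpr (fun x hx => (htake x hx).symm)
        have h2 : (xs.dropWhile (fun x => x == k)).count k = 0 :=
          List.count_eq_zero.mpr (pv_head_not_mem_drop k xs hs)
        omega
      rw [pvRuns]
      simp [hc]
    · have hkxs : k ∈ xs := by
        rcases List.mem_cons.mp hk with h | h
        · exact absurd h hkh
        · exact h
      have hkdrop : k ∈ xs.dropWhile (fun x => x == head) := by
        rw [← hsplit] at hkxs
        rcases List.mem_append.mp hkxs with h | h
        · exact absurd (htake k h) hkh
        · exact h
      have hxs : xs.count k = (xs.takeWhile (fun x => x == head)).count k +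
          (xs.dropWhile (fun x => x == head)).count k := by
        conv_lhs => rw [← hsplit]
        rw [List.count_append]
      have hcount : (head :: xs).count k = (xs.dropWhile (fun x => x == head)).count k := by
        rw [List.count_cons_of_ne (fun h => hkh h.symm)]
        have : (xs.takeWhile (fun x => x == head)).count k = 0 :=
          List.count_eq_zero.mpr (fun h => hkh (htake k h))
        omega
      rw [pvRuns]
      refine List.mem_cons.mpr (Or.inr ?_)
      rw [hcount]
      exact ih hdrop_pw k hkdrop

-- the keys of the run-length encoding of a sorted list are pairwise distinct
theorem pv_runs_keys_nodup (s : List String) (hs : s.Pairwise (· ≤ ·)) :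
    ((pvRuns s).map Prod.fst).Nodup := by
  induction s using pvRuns.induct with
  | case1 => simp [pvRuns]
  | case2 head xs ih =>
    rw [pvRuns]
    simp only [List.map_cons, List.nodup_cons]
    have hdrop_pw : (xs.dropWhile (fun x => x == head)).Pairwise (· ≤ ·) :=
      ((List.pairwise_cons.mp hs).2).sublist (List.dropWhile_sublist _)
    refine ⟨?_, ih hdrop_pw⟩
    intro hmem
    rcases List.mem_map.mp hmem with ⟨p, hp, hfst⟩
    have := pv_runs_key_mem _ p hp
    rw [hfst] at this
    exact pv_head_not_mem_drop head xs hs this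

-- dict(_runs(sorted keys)) looks up each member's count
theorem pv_counts_getD (s : List String) (hs : s.Pairwise (· ≤ ·)) (k : String) (hk : k ∈ s) :
    (PySem.Dict.ofList (pvRuns s)).getD k 0 = (s.count k : Int) := by
  have hofl : PySem.Dict.ofList (pvRuns s) =
      (pvRuns s).foldl (fun d p => d.insert p.1 p.2) PySem.Dict.empty := rfl
  have hitems : ((pvRuns s).foldl (fun d p => d.insert p.1 p.2) PySem.Dict.empty).items =
      PySem.Dict.empty.items ++ (pvRuns s).map (fun p => (p.1, p.2)) :=
    PySem.Dict.items_foldl_insert_fresh (pvRuns s) Prod.fst Prod.snd PySem.Dict.empty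
      (fun a _ => PySem.Dict.contains_empty _) (pv_runs_keys_nodup s hs)
  have hitems' : (PySem.Dict.ofList (pvRuns s)).items = pvRuns s := by
    rw [hofl, hitems]
    show [] ++ _ = _
    simp
  have hnodup : (PySem.Dict.ofList (pvRuns s)).keys.Nodup := by
    have : (PySem.Dict.ofList (pvRuns s)).keys = (pvRuns s).map Prod.fst := by
      simp only [PySem.Dict.keys, hitems']
    rw [this]; exact pv_runs_keys_nodup s hs
  have hmem : (k, (s.count k : Int)) ∈ (PySem.Dict.ofList (pvRuns s)).items := by
    rw [hitems']; exact pv_runs_count_mem s hs k hk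
  exact PySem.Dict.getD_of_mem_items _ hmem hnodup 0

-- A missing key's getD is the default (A's 'else' branch value 1 = getD + 1).
theorem pv_getD_none (d : PySem.Dict String Int) (key : String) (h : d.contains key = false) :
    d.getD key 0 = 0 := PySem.Dict.getD_of_not_contains d 0 h

-- A's loop body: when the key is absent its getD is 0, so both branches are 'insert key (getD key 0 + 1)'.
theorem pv_step_eq (d : PySem.Dict String Int) (key : String) :
    (if d.contains key then d.insert key (d.getD key 0 + 1) else d.insert key 1) =
      d.insert key (d.getD key 0 + 1) := by
  by_cases h : d.contains key = true
  · simp [h]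
  · simp only [Bool.not_eq_true] at h
    simp [h, pv_getD_none d key h]

-- A's fold over the value-length keys is Counter(keys); B's staged sort/RLE lookup returns the same counts in the same order.
theorem pv_A_eq (strdict : List (String × String)) :
    gen_strdict_histogram strdict = gen_strdict_histogram_alt strdict := by
  unfold gen_strdict_histogram gen_strdict_histogram_alt
  simp only [pv_step_eq]
  rw [← List.foldl_map (g := fun (histogram : PySem.Dict String Int) key =>
          histogram.insert key (histogram.getD key 0 + 1))
        (f := fun (p : String × String) => PySem.Int.toStr (PySem.Str.len p.2)),
      PySem.Dict.foldl_insert_getD_add_one_eq_counter, PySem.Dict.items_counter]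
  simp only [← PySem.List.dedup_eq_ofList]
  apply List.map_congr_left
  intro k hk
  have hkin : k ∈ strdict.map (fun p => PySem.Int.toStr (PySem.Str.len p.2)) :=
    (PySem.List.mem_dedup _ _).mp hk
  have hsorted_mem : k ∈ PySem.List.sorted
      (strdict.map (fun p => PySem.Int.toStr (PySem.Str.len p.2))) (fun x => x) false :=
    (PySem.List.mem_sorted _ _ _ _).mpr hkin
  have hpw : (PySem.List.sorted
      (strdict.map (fun p => PySem.Int.toStr (PySem.Str.len p.2))) (fun x => x) false).Pairwise
      (· ≤ ·) := PySem.List.sorted_pairwise _ _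
  rw [pv_counts_getD _ hpw k hsorted_mem]
  have hperm : (PySem.List.sorted
      (strdict.map (fun p => PySem.Int.toStr (PySem.Str.len p.2))) (fun x => x) false).Perm
      (strdict.map (fun p => PySem.Int.toStr (PySem.Str.len p.2))) :=
    PySem.List.sorted_perm _ _ _
  rw [hperm.count_eq]

-- ===== VERDICT (by name: the statement is the Claim_ definition above) =====
theorem gen_strdict_histogram_spec : Claim_equal_gen_strdict_histogram := by
  intro strdict _
  exact pv_A_eq strdict
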